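-- pv_equiv track=rewrite | github.com/simon-wilmes/rehabiliation-admission-scheduling | src/utils.py | calculate_dict_distance
-- ===== SOURCE A (Python) =====
-- def calculate_dict_distance(dict1, dict2):
--     """
--     Calculate minimum changes needed to transform dict1 into dict2.
--
--     Args:
--         dict1: Dict[int, int] - First dictionary
--         dict2: Dict[int, int] - Second dictionary
--
--     Returns:
--         int - Number of changes needed
--     """
--     changes = 0
--
--     # Count keys that need to be added or changed
--     for key, value in dict2.items():
--         if key not in dict1 or dict1[key] != value:
--             changes += 1
--
--     # Count keys that need to be removed
--     for key in dict1:
--         if key not in dict2: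
--             changes += 1
--
--     return changes
-- ===== SOURCE B (Python) =====
-- def calculate_dict_distance(dict1, dict2):
--     """Sort both item lists by key and count mismatches in a single
--     two-pointer merge over the sorted sequences."""
--     a = sorted(dict1.items(), key=lambda kv: kv[0])
--     b = sorted(dict2.items(), key=lambda kv: kv[0])
--     i = j = changes = 0
--     while i < len(a) and j < len(b):
--         k1, v1 = a[i]
--         k2, v2 = b[j]
--         if k1 == k2:
--             if v1 != v2:
--                 changes += 1
--             i += 1
--             j += 1
--         elif k1 < k2:
--             changes += 1
--             i += 1
--         else:
--             changes += 1
--             j += 1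
--     return changes + (len(a) - i) + (len(b) - j)
-- ===== Notes on version B (the rewrite author's own statement) =====
-- stated objective: alternative
-- what changed: Replaces A's two hash-membership loops by sorting both item lists by key and counting all mismatches (value changes, additions, removals) in one two-pointer merge over the sorted sequences.
import Mathlib
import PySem

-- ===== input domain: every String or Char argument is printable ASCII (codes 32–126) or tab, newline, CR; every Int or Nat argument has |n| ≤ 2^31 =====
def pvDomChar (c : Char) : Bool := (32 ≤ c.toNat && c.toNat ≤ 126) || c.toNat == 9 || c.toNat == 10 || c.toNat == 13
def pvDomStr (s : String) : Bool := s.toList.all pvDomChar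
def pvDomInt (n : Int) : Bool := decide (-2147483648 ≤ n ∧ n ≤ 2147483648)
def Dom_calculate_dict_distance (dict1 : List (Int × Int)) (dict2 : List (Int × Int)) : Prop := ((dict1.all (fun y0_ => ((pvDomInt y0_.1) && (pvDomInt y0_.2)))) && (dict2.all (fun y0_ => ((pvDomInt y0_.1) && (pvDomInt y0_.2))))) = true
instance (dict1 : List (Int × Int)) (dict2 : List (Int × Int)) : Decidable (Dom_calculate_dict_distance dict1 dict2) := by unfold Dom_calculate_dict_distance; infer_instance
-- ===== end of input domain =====

-- B sorts both item lists by key and counts all mismatches (changed values, added keys,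
-- removed keys) in a single two-pointer merge, instead of A's two membership-testing loops.

-- ===== PORT A =====
def calculate_dict_distance (dict1 : List (Int × Int)) (dict2 : List (Int × Int)) : Int :=
  -- changes = 0; for key, value in dict2.items(): if key not in dict1 or dict1[key] != value: changes += 1
  let changes : Int := dict2.foldl (fun c kv =>
    if ((PySem.Dict.mk dict1).contains kv.1 = false ∨ (PySem.Dict.mk dict1).getD kv.1 0 ≠ kv.2)
    then c + 1 else c) 0
  -- for key in dict1: if key not in dict2: changes += 1
  dict1.foldl (fun c kv =>
    if (PySem.Dict.mk dict2).contains kv.1 = false then c + 1 else c) changes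

-- ===== PORT B =====
-- the 'while i < len(a) and j < len(b)' two-pointer loop of Source B, carrying the 'changes'
-- accumulator; consuming the lists head-first is the index advance, and the final
-- 'changes + (len(a)-i) + (len(b)-j)' is the exit of each base case
def pvMergeLoop : List (Int × Int) → List (Int × Int) → Int → Int
  | [], b, c => c + b.length
  | x :: as_, [], c => c + (x :: as_).length
  | (k1, v1) :: as_, (k2, v2) :: bs, c =>
    if k1 = k2 then pvMergeLoop as_ bs (if v1 ≠ v2 then c + 1 else c)
    else if k1 < k2 then pvMergeLoop as_ ((k2, v2) :: bs) (c + 1)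
    else pvMergeLoop ((k1, v1) :: as_) bs (c + 1)
  termination_by a b _ => a.length + b.length

def calculate_dict_distance_alt (dict1 : List (Int × Int)) (dict2 : List (Int × Int)) : Int :=
  let a := PySem.List.sorted dict1 (fun kv => kv.1) false
  let b := PySem.List.sorted dict2 (fun kv => kv.1) false
  pvMergeLoop a b 0

-- ===== PRECONDITION & SPEC =====
-- Pre_ excludes association lists with duplicate keys: they do not represent a Python dict
-- (both parameters of A are dicts, whose keys are always distinct), so A is never called on them.
def Pre_calculate_dict_distance (dict1 : List (Int × Int)) (dict2 : List (Int × Int)) : Prop :=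
  (dict1.map Prod.fst).Nodup ∧ (dict2.map Prod.fst).Nodup
instance (dict1 : List (Int × Int)) (dict2 : List (Int × Int)) : Decidable (Pre_calculate_dict_distance dict1 dict2) := by unfold Pre_calculate_dict_distance; infer_instance

def pvWitness_calculate_dict_distance : (List (Int × Int)) × (List (Int × Int)) :=
  ([(1, 2), (3, 4)], [(1, 5), (7, 4)])

def Spec_calculate_dict_distance (dict1 : List (Int × Int)) (dict2 : List (Int × Int)) (out : Int) : Prop := out = calculate_dict_distance_alt dict1 dict2
instance (dict1 : List (Int × Int)) (dict2 : List (Int × Int)) (out : Int) : Decidable (Spec_calculate_dict_distance dict1 dict2 out) := by unfold Spec_calculate_dict_distance; infer_instance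

-- ===== CLAIM (what is proved, stated in full; the proofs are below) =====
def Claim_equal_calculate_dict_distance : Prop := ∀ (dict1 : List (Int × Int)) (dict2 : List (Int × Int)), Dom_calculate_dict_distance dict1 dict2 → Pre_calculate_dict_distance dict1 dict2 → Spec_calculate_dict_distance dict1 dict2 (calculate_dict_distance dict1 dict2)

-- ===== LEMMAS AND PROOFS =====

-- a conditional-increment foldl over Int is a countP
theorem pv_foldl_if_count {α : Type} (p : α → Prop) [DecidablePred p] (l : List α) (a : Int) :
    l.foldl (fun c x => if p x then c + 1 else c) a = a + (l.countP (fun x => decide (p x)) : Int) := by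
  have h := PySem.List.foldl_count_if (fun x => decide (p x)) l a
  simpa using h

-- a dict built from a list is missing a key iff the key list misses it
theorem pv_contains_false {d : List (Int × Int)} (k : Int) :
    ((PySem.Dict.mk d).contains k = false) ↔ k ∉ d.map Prod.fst := by
  have h := PySem.Dict.contains_iff_mem_keys (PySem.Dict.mk d) k
  rw [PySem.Dict.keys_mk] at h
  constructor
  · intro hc hmem
    have := h.mpr hmem
    simp [hc] at this
  · intro hmem
    cases hcv : (PySem.Dict.mk d).contains k with
    | false => rfl
    | true => exact absurd (h.mp hcv) hmem

-- Dict.get? on a literal dict is first-match association lookup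
theorem pv_get?_mk_eq_lookup (d : List (Int × Int)) (k : Int) :
    (PySem.Dict.mk d).get? k = List.lookup k d := by
  induction d with
  | nil => simp [List.lookup]; rfl
  | cons x t ih =>
    obtain ⟨kx, vx⟩ := x
    rw [PySem.Dict.get?_mk_cons, List.lookup]
    by_cases h : kx = k
    · simp [h]
    · simp only [beq_iff_eq, h, if_false, ih]
      have : (k == kx) = false := by simp [(Ne.symm h)]
      rw [this]

-- A's loop predicate over dict2 is "lookup in dict1 does not yield this value"
theorem pv_predA_eq_lookup (d : List (Int × Int)) (kv : Int × Int) :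
    ((PySem.Dict.mk d).contains kv.1 = false ∨ (PySem.Dict.mk d).getD kv.1 0 ≠ kv.2)
      ↔ List.lookup kv.1 d ≠ some kv.2 := by
  rw [← pv_get?_mk_eq_lookup]
  rw [PySem.Dict.contains_eq_isSome_get?, PySem.Dict.getD_eq_get?_getD]
  cases h : (PySem.Dict.mk d).get? kv.1 with
  | none => simp
  | some w => simp

-- lookup misses when every stored key is larger
theorem pv_lookup_eq_none_of_lt (d : List (Int × Int)) (k : Int)
    (h : ∀ kv ∈ d, k < kv.1) : List.lookup k d = none := by
  induction d with
  | nil => rfl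
  | cons x t ih =>
    rw [List.lookup]
    have hx : k < x.1 := h x (List.mem_cons_self)
    have : (k == x.1) = false := by simp; omega
    rw [this]
    exact ih (fun kv hkv => h kv (List.mem_cons_of_mem x hkv))

-- in a nodup-keyed list, lookup finds exactly the stored pair
theorem pv_lookup_eq_some_iff_mem {d : List (Int × Int)} (hd : (d.map Prod.fst).Nodup)
    (k v : Int) : List.lookup k d = some v ↔ (k, v) ∈ d := by
  induction d with
  | nil => simp [List.lookup]
  | cons x t ih =>
    obtain ⟨kx, vx⟩ := x
    simp only [List.map_cons, List.nodup_cons] at hd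
    rw [List.lookup, List.mem_cons]
    by_cases h : k = kx
    · subst h
      simp only [beq_self_eq_true]
      constructor
      · intro hv; left; simpa using hv.symm
      · rintro (h1 | h1)
        · simp [Prod.ext_iff] at h1; simp [h1]
        · exact absurd (List.mem_map_of_mem (f := Prod.fst) h1) hd.1
    · have hkb : (k == kx) = false := by simp [h]
      rw [hkb]
      show List.lookup k t = some v ↔ _
      rw [ih hd.2]
      constructor
      · exact Or.inr
      · rintro (h1 | h1)
        · exact absurd (congrArg Prod.fst h1) h
        · exact h1

-- lookup is permutation-invariant between nodup-keyed lists
theorem pv_lookup_perm {d e : List (Int × Int)} (hp : d.Perm e)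
    (hd : (d.map Prod.fst).Nodup) (k : Int) : List.lookup k d = List.lookup k e := by
  have he : (e.map Prod.fst).Nodup := (hp.map Prod.fst).nodup_iff.mp hd
  cases h : List.lookup k d with
  | some v =>
    exact ((pv_lookup_eq_some_iff_mem he k v).mpr
      (hp.mem_iff.mp ((pv_lookup_eq_some_iff_mem hd k v).mp h))).symm
  | none =>
    cases h' : List.lookup k e with
    | none => rfl
    | some v =>
      have := (pv_lookup_eq_some_iff_mem hd k v).mpr
        (hp.mem_iff.mpr ((pv_lookup_eq_some_iff_mem he k v).mp h'))
      rw [h] at this; exact absurd this (by simp)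

-- the merge loop counts dict2-side lookup mismatches plus dict1-side missing keys,
-- provided both lists are strictly increasing in their keys
theorem pv_mergeLoop_spec (a b : List (Int × Int)) (c : Int)
    (ha : a.Pairwise (fun x y => x.1 < y.1)) (hb : b.Pairwise (fun x y => x.1 < y.1)) :
    pvMergeLoop a b c =
      c + (b.countP (fun kv => decide (List.lookup kv.1 a ≠ some kv.2)) : Int)
        + (a.countP (fun kv => decide (kv.1 ∉ b.map Prod.fst)) : Int) := by
  fun_induction pvMergeLoop a b c with
  | case1 b c =>
    simp [List.lookup]
  | case2 x as_ c =>
    simp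
  | case3 v1 as_ k v2 bs c ih =>
    rw [List.pairwise_cons] at ha hb
    have ih' := ih ha.2 hb.2
    have h1 : bs.countP (fun kv => decide (List.lookup kv.1 ((k, v1) :: as_) ≠ some kv.2))
        = bs.countP (fun kv => decide (List.lookup kv.1 as_ ≠ some kv.2)) := by
      apply List.countP_congr
      intro kv hkv
      have hne : (kv.1 == k) = false := by
        have := hb.1 kv hkv; simp; omega
      simp [List.lookup, hne]
    have h2 : as_.countP (fun kv => decide (kv.1 ∉ ((k, v2) :: bs).map Prod.fst))
        = as_.countP (fun kv => decide (kv.1 ∉ bs.map Prod.fst)) := by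
      apply List.countP_congr
      intro kv hkv
      have hk : kv.1 ≠ k := by have := ha.1 kv hkv; omega
      simp [hk]
    have hlook : List.lookup k ((k, v1) :: as_) = some v1 := by simp [List.lookup]
    simp only [dite_eq_ite] at ih'
    rw [ih']
    simp only [List.countP_cons, h1, h2]
    by_cases hv : v1 = v2
    · simp [hv, hlook]
    · simp [hv, hlook]; ring
  | case4 k1 v1 as_ k2 v2 bs c hne hlt ih =>
    rw [List.pairwise_cons] at ha
    have ih' := ih ha.2 hb
    have hbs : ∀ kv ∈ bs, k2 < kv.1 := (List.pairwise_cons.mp hb).1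
    have h1 : ((k2, v2) :: bs).countP
          (fun kv => decide (List.lookup kv.1 ((k1, v1) :: as_) ≠ some kv.2))
        = ((k2, v2) :: bs).countP (fun kv => decide (List.lookup kv.1 as_ ≠ some kv.2)) := by
      apply List.countP_congr
      intro kv hkv
      have hgt : k1 < kv.1 := by
        rcases List.mem_cons.mp hkv with h | h
        · rw [h]; exact hlt
        · have := hbs kv h; omega
      have : (kv.1 == k1) = false := by simp; omega
      simp [List.lookup, this]
    have hmem : k1 ∉ k2 :: List.map Prod.fst bs := by
      intro h
      rcases List.mem_cons.mp h with h | h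
      · omega
      · rcases List.mem_map.mp h with ⟨kv, hkv, hfst⟩
        have := hbs kv hkv; omega
    have hk1b : k1 ∉ List.map Prod.fst bs := fun h => hmem (List.mem_cons_of_mem _ h)
    rw [ih', h1]
    simp [List.countP_cons, hne, hk1b]
    ring
  | case5 k1 v1 as_ k2 v2 bs c hne hnlt ih =>
    have hgt : k2 < k1 := by omega
    rw [List.pairwise_cons] at hb
    have ih' := ih ha hb.2
    have ha1 : ∀ kv ∈ (k1, v1) :: as_, k2 < kv.1 := by
      intro kv hkv
      rcases List.mem_cons.mp hkv with h | h
      · rw [h]; exact hgt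
      · have := (List.pairwise_cons.mp ha).1 kv h; omega
    have hhead : List.lookup k2 ((k1, v1) :: as_) = none :=
      pv_lookup_eq_none_of_lt _ _ ha1
    have h2 : ((k1, v1) :: as_).countP (fun kv => decide (kv.1 ∉ ((k2, v2) :: bs).map Prod.fst))
        = ((k1, v1) :: as_).countP (fun kv => decide (kv.1 ∉ bs.map Prod.fst)) := by
      apply List.countP_congr
      intro kv hkv
      have hk : kv.1 ≠ k2 := by have := ha1 kv hkv; omega
      simp [hk]
    rw [ih', h2]
    simp [List.countP_cons, hhead]
    ring

-- a sorted-by-key rearrangement of a nodup-keyed list has strictly increasing keys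
theorem pv_sorted_pairwise_lt (d : List (Int × Int)) (hd : (d.map Prod.fst).Nodup) :
    (PySem.List.sorted d (fun kv => kv.1) false).Pairwise (fun x y => x.1 < y.1) := by
  have hperm : (PySem.List.sorted d (fun kv => kv.1) false).Perm d :=
    PySem.List.sorted_perm d _ false
  have hle : (PySem.List.sorted d (fun kv => kv.1) false).Pairwise (fun x y => x.1 ≤ y.1) :=
    PySem.List.sorted_pairwise d _
  have hnd : ((PySem.List.sorted d (fun kv => kv.1) false).map Prod.fst).Nodup :=
    (hperm.map Prod.fst).nodup_iff.mpr hd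
  have hne : (PySem.List.sorted d (fun kv => kv.1) false).Pairwise (fun x y => x.1 ≠ y.1) :=
    List.pairwise_map.mp hnd
  exact (hle.and hne).imp (fun h => lt_of_le_of_ne h.1 h.2)

theorem calculate_dict_distance_spec_aux (dict1 dict2 : List (Int × Int))
    (h1 : (dict1.map Prod.fst).Nodup) (h2 : (dict2.map Prod.fst).Nodup) :
    calculate_dict_distance dict1 dict2 = calculate_dict_distance_alt dict1 dict2 := by
  classical
  -- ---- A as two counts over the original lists ----
  have hA : calculate_dict_distance dict1 dict2 =
      ((dict2.countP (fun kv => decide ((PySem.Dict.mk dict1).contains kv.1 = false ∨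
          (PySem.Dict.mk dict1).getD kv.1 0 ≠ kv.2)) : Int)
       + (dict1.countP (fun kv => decide ((PySem.Dict.mk dict2).contains kv.1 = false)) : Int)) := by
    calc calculate_dict_distance dict1 dict2
        = dict1.foldl (fun c kv =>
            if (PySem.Dict.mk dict2).contains kv.1 = false then c + 1 else c)
            (dict2.foldl (fun c kv =>
              if ((PySem.Dict.mk dict1).contains kv.1 = false ∨
                  (PySem.Dict.mk dict1).getD kv.1 0 ≠ kv.2) then c + 1 else c) 0) := rfl
      _ = (dict2.foldl (fun c kv =>
              if ((PySem.Dict.mk dict1).contains kv.1 = false ∨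
                  (PySem.Dict.mk dict1).getD kv.1 0 ≠ kv.2) then c + 1 else c) 0)
            + (dict1.countP (fun kv => decide ((PySem.Dict.mk dict2).contains kv.1 = false)) : Int) :=
          pv_foldl_if_count _ dict1 _
      _ = _ := by rw [pv_foldl_if_count (fun kv : Int × Int =>
              ((PySem.Dict.mk dict1).contains kv.1 = false ∨
                (PySem.Dict.mk dict1).getD kv.1 0 ≠ kv.2)) dict2 0]; ring
  -- ---- rewrite A's predicates in lookup / key-membership form ----
  have hA1 : dict2.countP (fun kv => decide ((PySem.Dict.mk dict1).contains kv.1 = false ∨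
        (PySem.Dict.mk dict1).getD kv.1 0 ≠ kv.2))
      = dict2.countP (fun kv => decide (List.lookup kv.1 dict1 ≠ some kv.2)) := by
    apply List.countP_congr
    intro kv _
    rw [decide_eq_decide.mpr (pv_predA_eq_lookup dict1 kv)]
  have hA2 : dict1.countP (fun kv => decide ((PySem.Dict.mk dict2).contains kv.1 = false))
      = dict1.countP (fun kv => decide (kv.1 ∉ dict2.map Prod.fst)) := by
    apply List.countP_congr
    intro kv _
    rw [decide_eq_decide.mpr (pv_contains_false (d := dict2) kv.1)]
  -- ---- B via the merge invariant ----
  set s1 := PySem.List.sorted dict1 (fun kv => kv.1) false with hs1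
  set s2 := PySem.List.sorted dict2 (fun kv => kv.1) false with hs2
  have hp1 : s1.Perm dict1 := PySem.List.sorted_perm dict1 _ false
  have hp2 : s2.Perm dict2 := PySem.List.sorted_perm dict2 _ false
  have hB : calculate_dict_distance_alt dict1 dict2 =
      0 + (s2.countP (fun kv => decide (List.lookup kv.1 s1 ≠ some kv.2)) : Int)
        + (s1.countP (fun kv => decide (kv.1 ∉ s2.map Prod.fst)) : Int) :=
    pv_mergeLoop_spec s1 s2 0 (pv_sorted_pairwise_lt dict1 h1) (pv_sorted_pairwise_lt dict2 h2)
  -- ---- transport B's counts back to the original lists ----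
  have hns1 : (s1.map Prod.fst).Nodup := (hp1.map Prod.fst).nodup_iff.mpr h1
  have hc1 : s2.countP (fun kv => decide (List.lookup kv.1 s1 ≠ some kv.2))
      = dict2.countP (fun kv => decide (List.lookup kv.1 dict1 ≠ some kv.2)) := by
    rw [List.Perm.countP_eq _ hp2]
    apply List.countP_congr
    intro kv _
    have hl := pv_lookup_perm hp1 hns1 kv.1
    rw [decide_eq_decide.mpr (by rw [hl] : List.lookup kv.1 s1 ≠ some kv.2 ↔ List.lookup kv.1 dict1 ≠ some kv.2)]
  have hc2 : s1.countP (fun kv => decide (kv.1 ∉ s2.map Prod.fst))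
      = dict1.countP (fun kv => decide (kv.1 ∉ dict2.map Prod.fst)) := by
    rw [List.Perm.countP_eq _ hp1]
    apply List.countP_congr
    intro kv _
    rw [decide_eq_decide.mpr (by rw [(hp2.map Prod.fst).mem_iff] : kv.1 ∉ s2.map Prod.fst ↔ kv.1 ∉ dict2.map Prod.fst)]
  rw [hA, hA1, hA2, hB, hc1, hc2]
  ring

-- ===== VERDICT (by name: the statement is the Claim_ definition above) =====
theorem calculate_dict_distance_spec : Claim_equal_calculate_dict_distance := by
  intro d1 d2 _ hpre
  unfold Spec_calculate_dict_distance
  exact calculate_dict_distance_spec_aux d1 d2 hpre.1 hpre.2
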